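-- pv_equiv track=rewrite | github.com/standupmaths/xmastree2021 | light_fixer.py | discriminate_gaps
-- ===== SOURCE A (Python) =====
-- def discriminate_gaps(gaps, max_dist):
--     """
--     find all the gaps below the max_dist
--     :param gaps: gaps between LEDs
--     :param max_dist: max_dist as determined by estimate_max_dist
--     :return track: 1 means needs fixing; 0 means no need to fix
--     """
--     track = []
--     for i in gaps:
--         if i < max_dist:
--             track.append(0)
--         else:
--             track.append(1)
--     # NOW REMOVE SINGLE OK GAPS
--     scan = 1
--     while scan < len(track) - 1:
--         if track[scan - 1] + track[scan + 1] == 2: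
--             track[scan] = 1
--         scan += 1
--     return track
-- ===== SOURCE B (Python) =====
-- def discriminate_gaps(gaps, max_dist):
--     n = len(gaps)
--     return [
--         1 if gaps[i] >= max_dist
--         else (1 if 0 < i < n - 1 and gaps[i - 1] >= max_dist and gaps[i + 1] >= max_dist else 0)
--         for i in range(n)
--     ]
-- ===== Notes on version B (the rewrite author's own statement) =====
-- stated objective: simpler
-- what changed: replaces A's two-phase build-then-mutate sweep (build 0/1 list, then a while loop filling isolated zeros in place) with a single comprehension computing each flag directly from the raw gap comparisons, using the fact that a freshly filled cell can never re-trigger its neighbor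
import Mathlib
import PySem

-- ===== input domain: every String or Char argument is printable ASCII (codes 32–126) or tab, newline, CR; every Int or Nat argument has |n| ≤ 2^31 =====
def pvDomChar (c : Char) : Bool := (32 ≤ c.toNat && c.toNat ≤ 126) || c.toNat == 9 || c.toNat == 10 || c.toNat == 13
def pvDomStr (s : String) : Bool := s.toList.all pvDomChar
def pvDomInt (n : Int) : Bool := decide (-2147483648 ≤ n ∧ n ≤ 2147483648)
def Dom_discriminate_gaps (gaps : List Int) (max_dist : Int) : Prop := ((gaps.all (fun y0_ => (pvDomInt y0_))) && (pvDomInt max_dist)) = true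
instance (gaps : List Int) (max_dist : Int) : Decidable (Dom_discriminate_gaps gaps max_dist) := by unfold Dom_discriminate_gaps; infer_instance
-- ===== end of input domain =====

-- B replaces A's build-then-mutate sweep with one pass reading the raw gap comparisons; objective: simpler.

-- ===== PORT A =====
-- while loop of A: scan counts up while scan < len(track) - 1; fuel = len(track) makes it total
-- (the loop body runs at most len(track) - 2 times); indices scan-1, scan+1 are in range, getD is exact.
def dgLoop : Nat → List Int → Nat → List Int
  | 0, track, _ => track
  | fuel+1, track, scan =>
    if scan < track.length - 1 then
      dgLoop fuel
        (if track.getD (scan-1) 0 + track.getD (scan+1) 0 = 2 then track.set scan 1 else track)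
        (scan+1)
    else track

def discriminate_gaps (gaps : List Int) (max_dist : Int) : List Int :=
  let track := gaps.foldl (fun t i => t ++ [if i < max_dist then (0:Int) else 1]) []
  dgLoop track.length track 1

-- ===== PORT B =====
-- body of Source B's comprehension (gaps[i±1] is only read when in range, so getD is exact)
def bFlag (gaps : List Int) (max_dist : Int) (i : Nat) : Int :=
  if gaps.getD i 0 ≥ max_dist then 1
  else if 0 < i ∧ i < gaps.length - 1 ∧ gaps.getD (i-1) 0 ≥ max_dist ∧ gaps.getD (i+1) 0 ≥ max_dist
    then 1 else 0

def discriminate_gaps_alt (gaps : List Int) (max_dist : Int) : List Int :=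
  (List.range gaps.length).map (bFlag gaps max_dist)

-- ===== PRECONDITION & SPEC =====
def Spec_discriminate_gaps (gaps : List Int) (max_dist : Int) (out : List Int) : Prop := out = discriminate_gaps_alt gaps max_dist
instance (gaps : List Int) (max_dist : Int) (out : List Int) : Decidable (Spec_discriminate_gaps gaps max_dist out) := by unfold Spec_discriminate_gaps; infer_instance

-- ===== CLAIM (what is proved, stated in full; the proofs are below) =====
def Claim_equal_discriminate_gaps : Prop := ∀ (gaps : List Int) (max_dist : Int), Dom_discriminate_gaps gaps max_dist → Spec_discriminate_gaps gaps max_dist (discriminate_gaps gaps max_dist)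

-- ===== LEMMAS AND PROOFS =====

-- raw flag of position j (A's first pass, pointwise)
def rawFlag (gaps : List Int) (max_dist : Int) (j : Nat) : Int :=
  if gaps.getD j 0 < max_dist then 0 else 1

lemma foldl_append_map (gaps : List Int) (m : Int) (acc : List Int) :
    gaps.foldl (fun t i => t ++ [if i < m then (0:Int) else 1]) acc
      = acc ++ gaps.map (fun i => if i < m then (0:Int) else 1) := by
  induction gaps generalizing acc with
  | nil => simp
  | cons g gs ih => simp [List.foldl, ih]

lemma raw_getD (gaps : List Int) (m : Int) (j : Nat) (hj : j < gaps.length) :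
    (gaps.map (fun i => if i < m then (0:Int) else 1)).getD j 0 = rawFlag gaps m j := by
  rw [List.getD_eq_getElem _ _ (by simpa using hj)]
  simp [rawFlag, List.getElem?_eq_getElem hj]

lemma bFlag_eq_raw_of_border (gaps : List Int) (m : Int) (j : Nat)
    (h : gaps.length - 1 ≤ j) : bFlag gaps m j = rawFlag gaps m j := by
  unfold bFlag rawFlag
  split_ifs <;> omega

lemma bFlag_zero (gaps : List Int) (m : Int) :
    bFlag gaps m 0 = rawFlag gaps m 0 := by
  unfold bFlag rawFlag
  split_ifs <;> omega

-- final-state lemma: once scan ≥ n-1 the track equals the spec list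
lemma track_done (gaps : List Int) (m : Int) (track : List Int) (scan : Nat)
    (hlen : track.length = gaps.length) (hscan : gaps.length - 1 ≤ scan)
    (hinv : ∀ j, j < gaps.length →
      track.getD j 0 = if j < scan then bFlag gaps m j else rawFlag gaps m j) :
    track = (List.range gaps.length).map (bFlag gaps m) := by
  apply List.ext_getElem (by simpa using hlen)
  intro j hj hj'
  have hjn : j < gaps.length := by simpa [hlen] using hj
  have := hinv j hjn
  rw [List.getD_eq_getElem _ _ hj] at this
  rw [this]
  by_cases hc : j < scan
  · simp [hc]
  · have : gaps.length - 1 ≤ j := by omega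
    simp [hc, bFlag_eq_raw_of_border gaps m j this]

-- key case analysis: the value written (or kept) at position scan equals bFlag
lemma step_value (gaps : List Int) (m : Int) (scan : Nat)
    (h1 : 1 ≤ scan) (h2 : scan < gaps.length - 1) :
    (if bFlag gaps m (scan-1) + rawFlag gaps m (scan+1) = 2 then (1:Int)
     else rawFlag gaps m scan) = bFlag gaps m scan := by
  have hs1 : scan - 1 + 1 = scan := by omega
  unfold bFlag rawFlag
  rw [hs1]
  split_ifs <;> omega

lemma dgLoop_inv (gaps : List Int) (m : Int) :
    ∀ (fuel : Nat) (track : List Int) (scan : Nat),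
    track.length = gaps.length → 1 ≤ scan → gaps.length - 1 ≤ scan + fuel →
    (∀ j, j < gaps.length →
      track.getD j 0 = if j < scan then bFlag gaps m j else rawFlag gaps m j) →
    dgLoop fuel track scan = (List.range gaps.length).map (bFlag gaps m) := by
  intro fuel
  induction fuel with
  | zero =>
    intro track scan hlen hscan hfuel hinv
    simp only [dgLoop]
    exact track_done gaps m track scan hlen (by omega) hinv
  | succ fuel ih =>
    intro track scan hlen hscan hfuel hinv
    rw [dgLoop]
    by_cases hlt : scan < track.length - 1
    · rw [if_pos hlt]
      rw [hlen] at hlt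
      have hm1 := hinv (scan-1) (by omega)
      have hp1 := hinv (scan+1) (by omega)
      rw [if_pos (by omega)] at hm1
      rw [if_neg (by omega)] at hp1
      have hstep := step_value gaps m scan hscan hlt
      by_cases hc : track.getD (scan-1) 0 + track.getD (scan+1) 0 = 2
      · rw [if_pos hc]
        rw [hm1, hp1] at hc
        rw [if_pos hc] at hstep
        apply ih _ _ (by simp [hlen]) (by omega) (by omega)
        intro j hj
        by_cases hjs : j = scan
        · subst hjs
          rw [if_pos (by omega)]
          rw [List.getD_eq_getElem _ _ (by rw [List.length_set, hlen]; omega)]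
          rw [List.getElem_set]
          rw [if_pos rfl]
          exact hstep
        · have hj' : j < track.length := by omega
          rw [List.getD_eq_getElem _ _ (by rw [List.length_set]; omega)]
          rw [List.getElem_set]
          rw [if_neg (fun h => hjs h.symm)]
          rw [← List.getD_eq_getElem track _ hj']
          rw [hinv j hj]
          by_cases hj1 : j < scan
          · rw [if_pos hj1, if_pos (by omega)]
          · rw [if_neg hj1, if_neg (by omega)]
      · rw [if_neg hc]
        rw [hm1, hp1] at hc
        rw [if_neg hc] at hstep
        apply ih _ _ hlen (by omega) (by omega)
        intro j hj
        rw [hinv j hj]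
        by_cases hjs : j = scan
        · subst hjs
          rw [if_neg (by omega), if_pos (by omega)]
          exact hstep
        · by_cases hj1 : j < scan
          · rw [if_pos hj1, if_pos (by omega)]
          · rw [if_neg hj1, if_neg (by omega)]
    · rw [if_neg hlt]
      rw [hlen] at hlt
      exact track_done gaps m track scan hlen (by omega) hinv

-- ===== VERDICT (by name: the statement is the Claim_ definition above) =====
theorem discriminate_gaps_spec : Claim_equal_discriminate_gaps := by
  intro gaps m _
  unfold Spec_discriminate_gaps discriminate_gaps discriminate_gaps_alt
  simp only [foldl_append_map, List.nil_append]
  apply dgLoop_inv gaps m _ _ 1 (by simp) le_rfl (by simp; omega)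
  intro j hj
  rw [raw_getD gaps m j hj]
  by_cases hj1 : j < 1
  · rw [if_pos hj1]
    have : j = 0 := by omega
    subst this
    exact (bFlag_zero gaps m).symm
  · rw [if_neg hj1]
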